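-- pv_equiv track=rewrite | github.com/erictao04/Reasoning-Motifs | reasoning_motifs_web/exporter.py | _contains_motif
-- ===== SOURCE A (Python) =====
-- def _contains_motif(tokens: tuple[str, ...], motif_tokens: tuple[str, ...]) -> bool:
--     if not motif_tokens or len(tokens) < len(motif_tokens):
--         return False
--     width = len(motif_tokens)
--     for idx in range(0, len(tokens) - width + 1):
--         if tokens[idx : idx + width] == motif_tokens:
--             return True
--     return False
-- ===== SOURCE B (Python) =====
-- def _contains_motif(tokens: tuple[str, ...], motif_tokens: tuple[str, ...]) -> bool:
--     """Delimiter-encode both token sequences (tokens are text, NUL-free) and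
--     decide by a single substring test instead of comparing slices per index."""
--     if not motif_tokens or len(tokens) < len(motif_tokens):
--         return False
--     sep = "\x00"
--     haystack = sep + sep.join(tokens) + sep
--     needle = sep + sep.join(motif_tokens) + sep
--     return needle in haystack
-- ===== Notes on version B (the rewrite author's own statement) =====
-- stated objective: alternative
-- what changed: Instead of comparing a fresh width-long slice of tokens at every start index, B encodes both token sequences as NUL-delimited strings (tokens are NUL-free text) and decides with a single substring test on the encodings.
import Mathlib
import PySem

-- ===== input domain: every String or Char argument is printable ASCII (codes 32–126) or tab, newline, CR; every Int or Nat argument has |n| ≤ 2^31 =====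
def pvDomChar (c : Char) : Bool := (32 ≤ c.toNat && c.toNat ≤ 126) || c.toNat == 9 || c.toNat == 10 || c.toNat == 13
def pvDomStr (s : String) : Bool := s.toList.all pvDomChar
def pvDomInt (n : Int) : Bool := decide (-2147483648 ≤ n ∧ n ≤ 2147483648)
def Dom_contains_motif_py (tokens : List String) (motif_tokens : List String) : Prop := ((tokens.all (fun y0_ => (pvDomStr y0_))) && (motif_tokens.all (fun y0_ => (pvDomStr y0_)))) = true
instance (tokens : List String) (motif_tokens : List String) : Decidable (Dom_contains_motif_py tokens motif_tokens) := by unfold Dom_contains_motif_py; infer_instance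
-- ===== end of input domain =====

-- B replaces A's slice-per-index scan by a NUL-delimiter encoding of both token
-- sequences followed by a single substring search (objective: alternative).

-- ===== PORT A =====
def contains_motif_py (tokens : List String) (motif_tokens : List String) : Bool :=
  if motif_tokens.isEmpty || decide (tokens.length < motif_tokens.length) then false
  else
    let width : Int := (motif_tokens.length : Int)
    (PySem.List.pyRange 0 ((tokens.length : Int) - width + 1) 1).any
      (fun idx => PySem.List.slice tokens (some idx) (some (idx + width)) == motif_tokens)

-- ===== PORT B =====
def contains_motif_py_alt (tokens : List String) (motif_tokens : List String) : Bool :=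
  if motif_tokens.isEmpty || decide (tokens.length < motif_tokens.length) then false
  else
    let sep : String := "\x00"
    let haystack : String := sep ++ PySem.Str.join sep tokens ++ sep
    let needle : String := sep ++ PySem.Str.join sep motif_tokens ++ sep
    PySem.Str.isIn needle haystack

-- ===== PRECONDITION & SPEC =====
def Spec_contains_motif_py (tokens : List String) (motif_tokens : List String) (out : Bool) : Prop := out = contains_motif_py_alt tokens motif_tokens
instance (tokens : List String) (motif_tokens : List String) (out : Bool) : Decidable (Spec_contains_motif_py tokens motif_tokens out) := by unfold Spec_contains_motif_py; infer_instance

-- ===== CLAIM (what is proved, stated in full; the proofs are below) =====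
def Claim_equal_contains_motif_py : Prop := ∀ (tokens : List String) (motif_tokens : List String), Dom_contains_motif_py tokens motif_tokens → Spec_contains_motif_py tokens motif_tokens (contains_motif_py tokens motif_tokens)

-- ===== LEMMAS AND PROOFS =====

-- The NUL separator, and the encoding of a token sequence as a character list:
-- each token preceded by a separator, plus one trailing separator.
def sepC : Char := '\x00'

def encTok (l : List (List Char)) : List Char := l.flatMap (fun x => sepC :: x) ++ [sepC]

theorem encTok_nil : encTok [] = [sepC] := rfl

theorem encTok_cons (x : List Char) (xs : List (List Char)) :
    encTok (x :: xs) = sepC :: (x ++ encTok xs) := by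
  simp [encTok, List.flatMap_cons, List.append_assoc]

theorem encTok_head (l : List (List Char)) : ∃ y, encTok l = sepC :: y := by
  cases l with
  | nil => exact ⟨[], encTok_nil⟩
  | cons x xs => exact ⟨x ++ encTok xs, encTok_cons x xs⟩

-- encTok agrees with "sep + sep.join(l) + sep" on NONEMPTY l.
theorem encTok_eq_intercalate (x : List Char) (xs : List (List Char)) :
    sepC :: (List.intercalate [sepC] (x :: xs) ++ [sepC]) = encTok (x :: xs) := by
  induction xs generalizing x with
  | nil =>
      rw [encTok_cons, encTok_nil]
      unfold List.intercalate; simp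
  | cons y ys ih =>
      rw [encTok_cons]
      have hstep : List.intercalate [sepC] (x :: y :: ys)
          = x ++ [sepC] ++ List.intercalate [sepC] (y :: ys) := by
        unfold List.intercalate; simp [List.intersperse]
      rw [hstep, ← ih y]
      simp

-- Alignment of a separator-started tail behind separator-free heads (prefix form).
theorem prefix_align : ∀ (m t a b : List Char), sepC ∉ m → sepC ∉ t →
    (m ++ sepC :: a) <+: (t ++ sepC :: b) → m = t ∧ a <+: b := by
  intro m
  induction m with
  | nil =>
      intro t a b _ ht h
      cases t with
      | nil =>
          rw [List.nil_append, List.nil_append, List.cons_prefix_cons] at h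
          exact ⟨rfl, h.2⟩
      | cons t0 t' =>
          rw [List.nil_append, List.cons_append, List.cons_prefix_cons] at h
          exact absurd (by rw [h.1]; exact List.mem_cons_self : sepC ∈ t0 :: t') ht
  | cons m0 m' ih =>
      intro t a b hm ht h
      cases t with
      | nil =>
          rw [List.cons_append, List.nil_append, List.cons_prefix_cons] at h
          exact absurd (by rw [← h.1]; exact List.mem_cons_self : sepC ∈ m0 :: m') hm
      | cons t0 t' =>
          rw [List.cons_append, List.cons_append, List.cons_prefix_cons] at h
          obtain ⟨he, hp⟩ := h
          obtain ⟨heq, hab⟩ := ih t' a b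
            (fun hx => hm (List.mem_cons_of_mem _ hx))
            (fun hx => ht (List.mem_cons_of_mem _ hx)) hp
          exact ⟨by rw [he, heq], hab⟩

-- A separator-started pattern inside t ++ rest (t separator-free) lies inside rest.
theorem infix_align : ∀ (t x r : List Char), sepC ∉ t →
    (sepC :: x) <:+: (t ++ sepC :: r) → (sepC :: x) <:+: (sepC :: r) := by
  intro t
  induction t with
  | nil => intro x r _ h; simpa using h
  | cons t0 t' ih =>
      intro x r ht h
      rw [List.cons_append] at h
      rcases List.infix_cons_iff.mp h with hp | hi
      · rw [List.cons_prefix_cons] at hp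
        exact absurd (by rw [hp.1]; exact List.mem_cons_self : sepC ∈ t0 :: t') ht
      · exact ih x r (fun hx => ht (List.mem_cons_of_mem _ hx)) hi

-- Encoded prefix forces a prefix of the token sequences.
theorem encTok_prefix : ∀ (ts ms : List (List Char)),
    (∀ x ∈ ts, sepC ∉ x) → (∀ x ∈ ms, sepC ∉ x) →
    encTok ms <+: encTok ts → ms <+: ts := by
  intro ts
  induction ts with
  | nil =>
      intro ms _ _ h
      cases ms with
      | nil => exact List.prefix_refl _
      | cons m ms' =>
          exfalso
          have hlen := h.length_le
          rw [encTok_cons, encTok_nil] at hlen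
          obtain ⟨y, hy⟩ := encTok_head ms'
          simp [hy] at hlen
  | cons t ts' ih =>
      intro ms hts hms h
      cases ms with
      | nil => exact List.nil_prefix
      | cons m ms' =>
          rw [encTok_cons, encTok_cons, List.cons_prefix_cons] at h
          obtain ⟨y, hy⟩ := encTok_head ms'
          obtain ⟨z, hz⟩ := encTok_head ts'
          rw [hy, hz] at h
          obtain ⟨heq, hpre⟩ := prefix_align m t y z
            (hms m List.mem_cons_self) (hts t List.mem_cons_self) h.2
          have hrec : ms' <+: ts' := by
            refine ih ms' (fun x hx => hts x (List.mem_cons_of_mem _ hx))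
              (fun x hx => hms x (List.mem_cons_of_mem _ hx)) ?_
            rw [hy, hz]; exact List.cons_prefix_cons.mpr ⟨rfl, hpre⟩
          exact heq ▸ (List.cons_prefix_cons.mpr ⟨rfl, hrec⟩)

-- Main: encoded infix ↔ token infix (for separator-free tokens).
theorem encTok_infix_iff : ∀ (ts ms : List (List Char)),
    (∀ x ∈ ts, sepC ∉ x) → (∀ x ∈ ms, sepC ∉ x) →
    (encTok ms <:+: encTok ts ↔ ms <:+: ts) := by
  intro ts
  induction ts with
  | nil =>
      intro ms _ hms
      constructor
      · intro h
        cases ms with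
        | nil => exact List.infix_refl _
        | cons m ms' =>
            exfalso
            have hlen := h.length_le
            rw [encTok_cons, encTok_nil] at hlen
            obtain ⟨y, hy⟩ := encTok_head ms'
            simp [hy] at hlen
      · rintro ⟨p, s, hps⟩
        have hl := congrArg List.length hps
        simp only [List.length_append, List.length_nil] at hl
        have hmsnil : ms = [] := List.eq_nil_of_length_eq_zero (by omega)
        rw [hmsnil]
  | cons t ts' ih =>
      intro ms hts hms
      constructor
      · intro h
        rw [encTok_cons] at h
        rcases List.infix_cons_iff.mp h with hp | hi
        · have hpre : ms <+: t :: ts' := by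
            apply encTok_prefix (t :: ts') ms hts hms
            rw [encTok_cons]; exact hp
          exact hpre.isInfix
        · obtain ⟨y, hy⟩ := encTok_head ms
          obtain ⟨z, hz⟩ := encTok_head ts'
          rw [hy, hz] at hi
          have hi' := infix_align t y z (hts t List.mem_cons_self) hi
          have hrec : ms <:+: ts' := by
            refine (ih ms (fun x hx => hts x (List.mem_cons_of_mem _ hx)) hms).mp ?_
            rw [hy, hz]; exact hi'
          exact List.infix_cons hrec
      · rintro ⟨p, s, hps⟩
        rw [← hps]
        obtain ⟨z, hz⟩ := encTok_head s
        refine ⟨p.flatMap (fun x => sepC :: x), z, ?_⟩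
        have h1 : encTok (p ++ ms ++ s)
            = p.flatMap (fun x => sepC :: x) ++ ms.flatMap (fun x => sepC :: x) ++ encTok s := by
          simp [encTok, List.flatMap_append, List.append_assoc]
        have h2 : encTok ms ++ z = ms.flatMap (fun x => sepC :: x) ++ encTok s := by
          rw [hz]; simp [encTok, List.append_assoc]
        rw [h1]
        simp only [List.append_assoc]
        rw [h2]

-- A's scan hits ↔ the motif is an infix (under the guard's bounds).
theorem scan_iff_infix (tokens motif_tokens : List String)
    (hw : motif_tokens.length ≤ tokens.length) :
    ((PySem.List.pyRange 0 ((tokens.length : Int) - (motif_tokens.length : Int) + 1) 1).any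
      (fun idx => PySem.List.slice tokens (some idx) (some (idx + (motif_tokens.length : Int))) == motif_tokens)) = true
      ↔ motif_tokens <:+: tokens := by
  rw [List.any_eq_true]
  constructor
  · rintro ⟨idx, hmem, hslice⟩
    rw [PySem.List.mem_pyRange_one] at hmem
    obtain ⟨h0, hlt⟩ := hmem
    rw [beq_iff_eq] at hslice
    rw [PySem.List.slice_toNat tokens h0 (by omega)] at hslice
    have htn : (idx + (motif_tokens.length : Int)).toNat - idx.toNat = motif_tokens.length := by
      omega
    rw [htn] at hslice
    calc motif_tokens = (tokens.drop idx.toNat).take motif_tokens.length := hslice.symm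
      _ <:+: tokens.drop idx.toNat := (List.take_prefix _ _).isInfix
      _ <:+: tokens := (List.drop_suffix _ _).isInfix
  · rintro ⟨p, s, rfl⟩
    refine ⟨(p.length : Int), ?_, ?_⟩
    · rw [PySem.List.mem_pyRange_one]
      constructor
      · exact_mod_cast Int.natCast_nonneg _
      · simp only [List.length_append] at *
        push_cast
        omega
    · rw [beq_iff_eq]
      rw [PySem.List.slice_toNat _ (by exact_mod_cast Int.natCast_nonneg _) (by positivity)]
      have h1 : ((p.length : Int) + (motif_tokens.length : Int)).toNat - (p.length : Int).toNat
          = motif_tokens.length := by omega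
      rw [h1]
      have h2 : (p.length : Int).toNat = p.length := by omega
      rw [h2, List.append_assoc, List.drop_left, List.take_left]

-- Strings in Dom never contain the NUL separator.
theorem dom_sep_free (s : String) (h : pvDomStr s = true) : sepC ∉ s.toList := by
  intro hc
  rw [pvDomStr, List.all_eq_true] at h
  have := h sepC hc
  simp [pvDomChar, sepC] at this

-- B's substring test ↔ the motif is an infix (for Dom inputs, both sides nonempty).
theorem isIn_iff_infix_tokens (tokens motif_tokens : List String)
    (hts : ∀ s ∈ tokens, pvDomStr s = true) (hms : ∀ s ∈ motif_tokens, pvDomStr s = true)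
    (htne : tokens ≠ []) (hmne : motif_tokens ≠ []) :
    PySem.Str.isIn ("\x00" ++ PySem.Str.join "\x00" motif_tokens ++ "\x00")
        ("\x00" ++ PySem.Str.join "\x00" tokens ++ "\x00") = true
      ↔ motif_tokens <:+: tokens := by
  rw [PySem.Str.isIn_iff_infix]
  have hE : ∀ (l : List String), l ≠ [] →
      ("\x00" ++ PySem.Str.join "\x00" l ++ "\x00").toList = encTok (l.map String.toList) := by
    intro l hl
    rw [String.toList_append, String.toList_append, PySem.Str.toList_join]
    show [sepC] ++ PySem.Chars.join [sepC] (l.map String.toList) ++ [sepC] = _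
    cases l with
    | nil => exact absurd rfl hl
    | cons x xs =>
        show [sepC] ++ List.intercalate [sepC] ((x :: xs).map String.toList) ++ [sepC] = _
        rw [List.map_cons]
        simp only [List.singleton_append]
        exact encTok_eq_intercalate (String.toList x) (List.map String.toList xs)
  rw [hE tokens htne, hE motif_tokens hmne]
  rw [encTok_infix_iff (tokens.map String.toList) (motif_tokens.map String.toList)
    (by rintro x hx; rw [List.mem_map] at hx; obtain ⟨s, hs, rfl⟩ := hx; exact dom_sep_free s (hts s hs))
    (by rintro x hx; rw [List.mem_map] at hx; obtain ⟨s, hs, rfl⟩ := hx; exact dom_sep_free s (hms s hs))]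
  constructor
  · intro h
    obtain ⟨l, hinf, hmap⟩ := List.infix_map_iff.mp h
    have : motif_tokens = l :=
      List.map_injective_iff.mpr (fun _ _ hst => String.toList_injective hst) hmap
    exact this ▸ hinf
  · exact fun h => h.map String.toList

-- ===== VERDICT (by name: the statement is the Claim_ definition above) =====
theorem contains_motif_py_spec : Claim_equal_contains_motif_py := by
  intro tokens motif_tokens hdom
  unfold Spec_contains_motif_py
  rw [Dom_contains_motif_py, Bool.and_eq_true, List.all_eq_true, List.all_eq_true] at hdom
  cases hg : (motif_tokens.isEmpty || decide (tokens.length < motif_tokens.length)) with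
  | true => simp [contains_motif_py, contains_motif_py_alt, hg]
  | false =>
      obtain ⟨h1, h2⟩ := Bool.or_eq_false_iff.mp hg
      have hme : motif_tokens ≠ [] := by cases motif_tokens <;> simp_all
      have hlen : motif_tokens.length ≤ tokens.length := by
        have := of_decide_eq_false h2; omega
      have hte : tokens ≠ [] := by
        intro h
        rw [h] at hlen; simp at hlen
        exact hme hlen
      simp only [contains_motif_py, contains_motif_py_alt, hg, Bool.false_eq_true,
        if_false]
      rw [Bool.eq_iff_iff]
      rw [scan_iff_infix tokens motif_tokens hlen]
      rw [isIn_iff_infix_tokens tokens motif_tokens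
        (fun s hs => hdom.1 s hs) (fun s hs => hdom.2 s hs) hte hme]
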